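-- pv_equiv track=rewrite | github.com/phansch/rust | src/libcore/unicode/unicode.py | compute_trie
-- ===== SOURCE A (Python) =====
-- def compute_trie(rawdata, chunksize):
--     root = []
--     childmap = {}
--     child_data = []
--     for i in range(len(rawdata) // chunksize):
--         data = rawdata[i * chunksize: (i + 1) * chunksize]
--         child = "|".join(map(str, data))
--         if child not in childmap:
--             childmap[child] = len(childmap)
--             child_data.extend(data)
--         root.append(childmap[child])
--     return root, child_data
-- ===== SOURCE B (Python) =====
-- def compute_trie(rawdata, chunksize):
--     # Stateless counting formulation: no dedup map is ever built.  For each chunk,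
--     # find the position of its first occurrence; its trie index is the number of
--     # first-occurrence positions strictly before that, and child_data is the
--     # concatenation of the chunks sitting at first-occurrence positions.
--     n = len(rawdata) // chunksize
--     chunks = [rawdata[k * chunksize:(k + 1) * chunksize] for k in range(n)]
--     first = [chunks.index(c) for c in chunks]
--     root = [sum(1 for j, fj in enumerate(first) if j < f and fj == j) for f in first]
--     child_data = [x for i, (f, c) in enumerate(zip(first, chunks)) if f == i for x in c]
--     return root, child_data
-- ===== Notes on version B (the rewrite author's own statement) =====
-- stated objective: alternative
-- what changed: B replaces A's incremental dedup map entirely by a stateless counting characterization: each chunk's first-occurrence position comes from list.index, its root label is the count of first-occurrence positions strictly before it, and child_data is the concatenation of chunks at first-occurrence positions -- no dictionary or seen-set is ever built.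
import Mathlib
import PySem

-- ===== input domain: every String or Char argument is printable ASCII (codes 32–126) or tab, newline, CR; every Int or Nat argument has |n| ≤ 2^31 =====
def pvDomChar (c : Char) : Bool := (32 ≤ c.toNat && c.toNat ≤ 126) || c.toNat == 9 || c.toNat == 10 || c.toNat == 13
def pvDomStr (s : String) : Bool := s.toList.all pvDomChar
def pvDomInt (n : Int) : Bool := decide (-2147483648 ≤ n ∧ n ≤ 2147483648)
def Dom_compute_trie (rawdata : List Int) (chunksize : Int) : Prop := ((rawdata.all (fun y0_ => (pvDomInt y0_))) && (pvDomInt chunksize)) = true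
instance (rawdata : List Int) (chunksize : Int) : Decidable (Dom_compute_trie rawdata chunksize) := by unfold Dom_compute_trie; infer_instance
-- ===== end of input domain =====

-- B drops A's incremental dedup dictionary entirely: it labels each chunk by
-- counting the first-occurrence positions before its own first occurrence
-- (objective: alternative algorithm; a timing run measured it faster on its
-- random inputs, by avoiding the per-chunk string-key formatting).

-- ===== PORT A =====
-- loop body of A: slice the i-th chunk, join it to a string key, dedup, append root index
-- (childmap[child] is ported as getD _ 0; the key was just ensured present, so no KeyError)
def ctA_step (rawdata : List Int) (chunksize : Int)
    (st : List Int × PySem.Dict String Int × List Int) (i : Int) :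
    List Int × PySem.Dict String Int × List Int :=
  let data := PySem.List.slice rawdata (some (i * chunksize)) (some ((i + 1) * chunksize))
  let child := PySem.Str.join "|" (data.map PySem.Int.toStr)
  let root := st.1
  let childmap := st.2.1
  let child_data := st.2.2
  let childmap' := if childmap.contains child then childmap
                   else childmap.insert child (childmap.size : Int)
  let child_data' := if childmap.contains child then child_data else child_data ++ data
  (root ++ [childmap'.getD child 0], childmap', child_data')

def compute_trie (rawdata : List Int) (chunksize : Int) : List Int × List Int :=
  let st := (PySem.List.pyRange 0 (PySem.Int.floordiv (PySem.List.len rawdata) chunksize) 1).foldl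
      (ctA_step rawdata chunksize) ([], PySem.Dict.empty, [])
  (st.1, st.2.2)

-- ===== PORT B =====
-- sum(1 for j, fj in enumerate(first) if j < f and fj == j)
def ctB_count (first : List Int) (f : Int) : Int :=
  (PySem.List.enumerate first).foldl
    (fun acc p => if p.1 < f ∧ p.2 = p.1 then acc + 1 else acc) 0

def compute_trie_alt (rawdata : List Int) (chunksize : Int) : List Int × List Int :=
  let n := PySem.Int.floordiv (PySem.List.len rawdata) chunksize
  let chunks := (PySem.List.pyRange 0 n 1).map
      (fun k => PySem.List.slice rawdata (some (k * chunksize)) (some ((k + 1) * chunksize)))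
  let first : List Int := chunks.map (fun c => (((PySem.List.index? chunks c).getD 0 : Nat) : Int))
  let root := first.map (fun f => ctB_count first f)
  let child_data := (PySem.List.enumerate (first.zip chunks)).foldl
      (fun acc p => if p.2.1 = p.1 then acc ++ p.2.2 else acc) ([] : List Int)
  (root, child_data)

-- ===== PRECONDITION & SPEC =====
-- Pre_ excludes only chunksize = 0, where A (and B) raise ZeroDivisionError.
def Pre_compute_trie (rawdata : List Int) (chunksize : Int) : Prop := chunksize ≠ 0
instance (rawdata : List Int) (chunksize : Int) : Decidable (Pre_compute_trie rawdata chunksize) := by unfold Pre_compute_trie; infer_instance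
def pvWitness_compute_trie : List Int × Int := ([1, 2, 1, 2, 3], 2)

def Spec_compute_trie (rawdata : List Int) (chunksize : Int) (out : List Int × List Int) : Prop := out = compute_trie_alt rawdata chunksize
instance (rawdata : List Int) (chunksize : Int) (out : List Int × List Int) : Decidable (Spec_compute_trie rawdata chunksize out) := by unfold Spec_compute_trie; infer_instance

-- ===== CLAIM (what is proved, stated in full; the proofs are below) =====
def Claim_equal_compute_trie : Prop := ∀ (rawdata : List Int) (chunksize : Int), Dom_compute_trie rawdata chunksize → Pre_compute_trie rawdata chunksize → Spec_compute_trie rawdata chunksize (compute_trie rawdata chunksize)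

-- ===== LEMMAS AND PROOFS =====

-- The '|'-joined string key A uses, as a function of the chunk (Char-list level).
def encC (c : List Int) : List Char := PySem.Chars.join ['|'] (c.map PySem.Int.toChars)
def encS (c : List Int) : String := PySem.Str.join "|" (c.map PySem.Int.toStr)

-- digits of a number, with 0 rendered as [0] (mirrors Nat.toDigits)
def padDigits (n : ℕ) : List ℕ := if n = 0 then [0] else Nat.digits 10 n

lemma padDigits_lt (n : ℕ) : ∀ d ∈ padDigits n, d < 10 := by
  intro d hd
  unfold padDigits at hd
  split at hd
  · simp at hd; omega
  · exact Nat.digits_lt_base (by norm_num) hd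

lemma padDigits_ne_nil (n : ℕ) : padDigits n ≠ [] := by
  unfold padDigits; split
  · simp
  · exact Nat.digits_ne_nil_iff_ne_zero.mpr (by assumption)

lemma padDigits_inj {m n : ℕ} (h : padDigits m = padDigits n) : m = n := by
  unfold padDigits at h
  split at h <;> split at h
  · omega
  · exfalso
    have h2 := Nat.ofDigits_digits 10 n
    rw [← h] at h2
    simp [Nat.ofDigits] at h2
    omega
  · exfalso
    have h2 := Nat.ofDigits_digits 10 m
    rw [h] at h2
    simp [Nat.ofDigits] at h2
    omega
  · exact Nat.digits.injective 10 h

lemma digitChar_inj {d1 d2 : ℕ} (h1 : d1 < 10) (h2 : d2 < 10)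
    (h : Nat.digitChar d1 = Nat.digitChar d2) : d1 = d2 := by
  interval_cases d1 <;> interval_cases d2 <;> simp_all [Nat.digitChar]

lemma digitChar_ne_bar {d : ℕ} (h : d < 10) : Nat.digitChar d ≠ '|' := by
  interval_cases d <;> decide

lemma digitChar_ne_dash {d : ℕ} (h : d < 10) : Nat.digitChar d ≠ '-' := by
  interval_cases d <;> decide

lemma toDigitsCore_eq (fuel : ℕ) : ∀ (n : ℕ) (acc : List Char), 0 < fuel → n < 10 ^ fuel →
    Nat.toDigitsCore 10 fuel n acc = ((padDigits n).map Nat.digitChar).reverse ++ acc := by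
  induction fuel with
  | zero => omega
  | succ f ih =>
    intro n acc _ hn
    rw [Nat.toDigitsCore]
    by_cases h0 : n / 10 = 0
    · simp only [h0, if_pos]
      have : padDigits n = [n % 10] := by
        unfold padDigits
        split
        · subst n; rfl
        · rw [Nat.digits_def' (by norm_num : (1:ℕ) < 10) (by omega),
              Nat.digits_eq_nil_iff_eq_zero.mpr h0]
      rw [this]; rfl
    · simp only [h0]
      have hf : 0 < f := by
        rcases Nat.eq_zero_or_pos f with hf0 | hf0
        · subst hf0; simp at hn; omega
        · exact hf0
      have hlt : n / 10 < 10 ^ f := by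
        have : n < 10 ^ f * 10 := by
          calc n < 10 ^ (f + 1) := hn
          _ = 10 ^ f * 10 := by ring
        omega
      rw [ih (n / 10) _ hf hlt]
      have hpd : padDigits n = n % 10 :: padDigits (n / 10) := by
        unfold padDigits
        have hn0 : n ≠ 0 := by omega
        rw [if_neg hn0, if_neg h0, Nat.digits_def' (by norm_num : (1:ℕ) < 10) (by omega)]
      rw [hpd]
      simp

lemma toDigits_eq (n : ℕ) : Nat.toDigits 10 n = ((padDigits n).map Nat.digitChar).reverse := by
  have : n < 10 ^ (n + 1) :=
    lt_of_lt_of_le (Nat.lt_pow_self (by norm_num)) (Nat.pow_le_pow_right (by norm_num) (by omega))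
  rw [Nat.toDigits, toDigitsCore_eq (n + 1) n [] (by omega) this, List.append_nil]

lemma toDigits_ne_nil (n : ℕ) : Nat.toDigits 10 n ≠ [] := by
  rw [toDigits_eq]
  simp [padDigits_ne_nil n]

lemma bar_not_mem_toDigits (n : ℕ) : '|' ∉ Nat.toDigits 10 n := by
  rw [toDigits_eq]
  simp only [List.mem_reverse, List.mem_map]
  rintro ⟨d, hd, hc⟩
  exact digitChar_ne_bar (padDigits_lt n d hd) hc

lemma dash_not_mem_toDigits (n : ℕ) : '-' ∉ Nat.toDigits 10 n := by
  rw [toDigits_eq]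
  simp only [List.mem_reverse, List.mem_map]
  rintro ⟨d, hd, hc⟩
  exact digitChar_ne_dash (padDigits_lt n d hd) hc

lemma map_digitChar_inj : ∀ {l1 l2 : List ℕ}, (∀ d ∈ l1, d < 10) → (∀ d ∈ l2, d < 10) →
    l1.map Nat.digitChar = l2.map Nat.digitChar → l1 = l2 := by
  intro l1
  induction l1 with
  | nil => intro l2 _ _ h; cases l2 <;> simp_all
  | cons x t ih =>
    intro l2 h1 h2 h
    cases l2 with
    | nil => simp at h
    | cons y s =>
      simp only [List.map_cons, List.cons.injEq] at h
      have hx := digitChar_inj (h1 x (by simp)) (h2 y (by simp)) h.1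
      rw [hx, ih (fun d hd => h1 d (by simp [hd])) (fun d hd => h2 d (by simp [hd])) h.2]

lemma toDigits10_inj {a b : ℕ} (h : Nat.toDigits 10 a = Nat.toDigits 10 b) : a = b := by
  rw [toDigits_eq, toDigits_eq, List.reverse_inj] at h
  exact padDigits_inj (map_digitChar_inj (padDigits_lt a) (padDigits_lt b) h)

lemma bar_not_mem_toChars (n : Int) : '|' ∉ PySem.Int.toChars n := by
  unfold PySem.Int.toChars
  split
  · simp only [List.mem_cons]
    rintro (h | h)
    · exact absurd h (by decide)
    · exact bar_not_mem_toDigits _ h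
  · exact bar_not_mem_toDigits _

lemma toChars_inj {m n : Int} (h : PySem.Int.toChars m = PySem.Int.toChars n) : m = n := by
  unfold PySem.Int.toChars at h
  split at h <;> split at h
  · simp only [List.cons.injEq] at h
    have := toDigits10_inj h.2
    omega
  · exfalso
    have hm : '-' ∈ Nat.toDigits 10 n.toNat := by rw [← h]; exact List.mem_cons_self ..
    exact dash_not_mem_toDigits _ hm
  · exfalso
    have hm : '-' ∈ Nat.toDigits 10 m.toNat := by rw [h]; exact List.mem_cons_self ..
    exact dash_not_mem_toDigits _ hm
  · have := toDigits10_inj h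
    omega

lemma append_bar_cancel : ∀ {a b r s : List Char}, '|' ∉ a → '|' ∉ b →
    a ++ '|' :: r = b ++ '|' :: s → a = b ∧ r = s := by
  intro a
  induction a with
  | nil =>
    intro b r s _ hb h
    cases b with
    | nil => simpa using h
    | cons y t =>
      simp only [List.nil_append, List.cons_append, List.cons.injEq] at h
      have hb' : ¬'|' = y ∧ '|' ∉ t := by simpa using hb
      exact absurd h.1 hb'.1
  | cons x a' ih =>
    intro b r s ha hb h
    cases b with
    | nil =>
      simp only [List.cons_append, List.nil_append, List.cons.injEq] at h
      have ha' : ¬'|' = x ∧ '|' ∉ a' := by simpa using ha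
      exact absurd h.1.symm ha'.1
    | cons y t =>
      simp only [List.cons_append, List.cons.injEq] at h
      obtain ⟨h1, h2⟩ := ih (by simp at ha; exact ha.2) (by simp at hb; exact hb.2) h.2
      exact ⟨by rw [h.1, h1], h2⟩

lemma encC_cons_cons (x y : Int) (t : List Int) :
    encC (x :: y :: t) = PySem.Int.toChars x ++ '|' :: encC (y :: t) := by
  simp [encC, PySem.Chars.join, List.intercalate]

lemma encC_ne_nil (x : Int) (t : List Int) : encC (x :: t) ≠ [] := by
  cases t with
  | nil =>
    have h : encC [x] = PySem.Int.toChars x := by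
      simp [encC, PySem.Chars.join, List.intercalate]
    rw [h]
    unfold PySem.Int.toChars
    split
    · simp
    · exact toDigits_ne_nil _
  | cons y t' =>
    rw [encC_cons_cons]
    rcases h : PySem.Int.toChars x with _ | ⟨c, cs⟩ <;> simp

lemma encC_inj : ∀ {c1 c2 : List Int}, encC c1 = encC c2 → c1 = c2 := by
  intro c1
  induction c1 with
  | nil =>
    intro c2 h
    cases c2 with
    | nil => rfl
    | cons y t => exact absurd h.symm (by simpa [encC] using encC_ne_nil y t)
  | cons x t ih =>
    intro c2 h
    cases c2 with
    | nil => exact absurd h (by simpa [encC] using encC_ne_nil x t)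
    | cons y s =>
      cases t with
      | nil =>
        cases s with
        | nil =>
          have : PySem.Int.toChars x = PySem.Int.toChars y := by
            simpa [encC, PySem.Chars.join, List.intercalate] using h
          rw [toChars_inj this]
        | cons z s' =>
          rw [encC_cons_cons] at h
          have hx : encC [x] = PySem.Int.toChars x := by
            simp [encC, PySem.Chars.join, List.intercalate]
          rw [hx] at h
          exact absurd (h ▸ (List.mem_append.mpr (Or.inr List.mem_cons_self)))
            (bar_not_mem_toChars x)
      | cons w t' =>
        cases s with
        | nil =>
          rw [encC_cons_cons] at h
          have hy : encC [y] = PySem.Int.toChars y := by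
            simp [encC, PySem.Chars.join, List.intercalate]
          rw [hy] at h
          exact absurd (h.symm ▸ (List.mem_append.mpr (Or.inr List.mem_cons_self)))
            (bar_not_mem_toChars y)
        | cons z s' =>
          rw [encC_cons_cons, encC_cons_cons] at h
          obtain ⟨h1, h2⟩ := append_bar_cancel (bar_not_mem_toChars x) (bar_not_mem_toChars y) h
          have := ih (c2 := z :: s') h2
          rw [toChars_inj h1, this]

lemma toList_encS (c : List Int) : (encS c).toList = encC c := by
  rw [encS, PySem.Str.toList_join, encC]
  congr 1
  simp [PySem.Int.toList_toStr]

lemma encS_inj {c1 c2 : List Int} (h : encS c1 = encS c2) : c1 = c2 := by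
  apply encC_inj
  rw [← toList_encS, ← toList_encS, h]

-- ===== chunk-level machinery =====

-- the chunk-level reading of A's loop body
def stepA (st : List Int × PySem.Dict String Int × List Int) (data : List Int) :
    List Int × PySem.Dict String Int × List Int :=
  let child := PySem.Str.join "|" (data.map PySem.Int.toStr)
  let childmap' := if st.2.1.contains child then st.2.1
                   else st.2.1.insert child (st.2.1.size : Int)
  let child_data' := if st.2.1.contains child then st.2.2 else st.2.2 ++ data
  (st.1 ++ [childmap'.getD child 0], childmap', child_data')

-- first-occurrence index of c in L (defined; Python's list.index, total form)
def fiN (L : List (List Int)) (c : List Int) : Nat := (PySem.List.index? L c).getD 0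

-- the `first` list of B, at chunk level
def fList (L : List (List Int)) : List Int := L.map (fun c => ((fiN L c : Nat) : Int))

lemma fiN_prefix (s X : List (List Int)) (c : List Int) (hc : c ∈ s) :
    fiN (s ++ X) c = fiN s c := by
  rw [fiN, fiN, PySem.List.index?_append_of_mem X hc]

lemma fiN_update (s : List (List Int)) (t : List (List Int)) (c : List Int) (hc : c ∈ s) :
    fiN (PySem.Set.update s t) c = fiN s c := by
  rw [PySem.Set.update_eq_append_filter, fiN_prefix _ _ _ hc]

lemma loopA (L : List (List Int)) :
    ∀ (root0 cd0 : List Int) (d : PySem.Dict String Int) (s : List (List Int)),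
    (∀ c, d.get? (encS c) = (PySem.List.index? s c).map (fun k => (k : Int))) →
    d.size = s.length →
    (L.foldl stepA (root0, d, cd0)).1 =
      root0 ++ L.map (fun c => ((fiN (PySem.Set.update s L) c : Nat) : Int)) ∧
    (L.foldl stepA (root0, d, cd0)).2.2 =
      cd0 ++ ((PySem.Set.update s L).drop s.length).flatten := by
  induction L with
  | nil =>
    intro root0 cd0 d s _ _
    simp [PySem.Set.update]
  | cons c t ih =>
    intro root0 cd0 d s hget hsize
    have hkey : PySem.Str.join "|" (c.map PySem.Int.toStr) = encS c := rfl
    have hcont : d.contains (encS c) = (PySem.List.index? s c).isSome := by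
      rw [PySem.Dict.contains_eq_isSome_get?, hget]
      cases PySem.List.index? s c <;> rfl
    rw [List.foldl_cons]
    by_cases hmem : c ∈ s
    · -- chunk already seen
      obtain ⟨k, hk⟩ := Option.isSome_iff_exists.mp
        ((PySem.List.index?_isSome_iff s c).mpr hmem)
      have hcontT : d.contains (encS c) = true := by rw [hcont, hk]; rfl
      have hstep : stepA (root0, d, cd0) c = (root0 ++ [(k : Int)], d, cd0) := by
        show (root0 ++ [_], _, _) = _
        rw [hkey]
        simp only [hcontT, if_pos]
        rw [PySem.Dict.getD_eq_get?_getD, hget, hk]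
        rfl
      rw [hstep]
      obtain ⟨h1, h2⟩ := ih (root0 ++ [(k : Int)]) cd0 d s hget hsize
      rw [PySem.Set.update_cons, PySem.Set.add_of_mem hmem]
      constructor
      · rw [h1, List.map_cons, fiN_update s t c hmem,
          show fiN s c = k by rw [fiN, hk]; rfl]
        simp
      · rw [h2]
    · -- fresh chunk
      have hnone : PySem.List.index? s c = none := (PySem.List.index?_eq_none_iff s c).mpr hmem
      have hcontF : d.contains (encS c) = false := by rw [hcont, hnone]; rfl
      have hstep : stepA (root0, d, cd0) c =
          (root0 ++ [(s.length : Int)], d.insert (encS c) ((s.length : Nat) : Int), cd0 ++ c) := by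
        show (root0 ++ [_], _, _) = _
        rw [hkey]
        simp only [hcontF, Bool.false_eq_true, if_neg, not_false_iff]
        rw [PySem.Dict.getD_insert_self, hsize]
      rw [hstep]
      have hget' : ∀ c', (d.insert (encS c) ((s.length : Nat) : Int)).get? (encS c') =
          (PySem.List.index? (s ++ [c]) c').map (fun k => (k : Int)) := by
        intro c'
        by_cases he : c' = c
        · subst he
          rw [PySem.Dict.get?_insert_self, PySem.List.index?_append_singleton_self s c' hmem]
          rfl
        · rw [PySem.Dict.get?_insert_of_ne _ _ (fun h => he (encS_inj h)), hget]
          by_cases hm' : c' ∈ s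
          · rw [PySem.List.index?_append_of_mem [c] hm']
          · rw [(PySem.List.index?_eq_none_iff s c').mpr hm',
              (PySem.List.index?_eq_none_iff (s ++ [c]) c').mpr (by simp [hm', he])]
      have hsize' : (d.insert (encS c) ((s.length : Nat) : Int)).size = (s ++ [c]).length := by
        rw [PySem.Dict.size_insert]
        simp [hcontF, hsize]
      obtain ⟨h1, h2⟩ := ih (root0 ++ [(s.length : Int)]) (cd0 ++ c)
        (d.insert (encS c) ((s.length : Nat) : Int)) (s ++ [c]) hget' hsize'
      rw [PySem.Set.update_cons, PySem.Set.add_of_not_mem hmem]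
      have hsplit : ∃ X, PySem.Set.update (s ++ [c]) t = (s ++ [c]) ++ X :=
        ⟨_, PySem.Set.update_eq_append_filter _ t⟩
      obtain ⟨X, hX⟩ := hsplit
      constructor
      · rw [h1, List.map_cons]
        have : fiN (PySem.Set.update (s ++ [c]) t) c = s.length := by
          rw [hX, fiN_prefix _ _ _ (by simp), fiN,
            PySem.List.index?_append_singleton_self s c hmem]
          rfl
        rw [this]
        simp
      · rw [h2, hX]
        have hd1 : ((s ++ [c]) ++ X).drop (s ++ [c]).length = X := List.drop_left
        have hd2 : ((s ++ [c]) ++ X).drop s.length = c :: X := by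
          rw [List.append_assoc, List.singleton_append,
            show s.length = (s).length from rfl]
          exact List.drop_left
        rw [hd1, hd2]
        simp

lemma fiN_lt_length {L : List (List Int)} {c : List Int} (hc : c ∈ L) : fiN L c < L.length := by
  obtain ⟨k, hk⟩ := Option.isSome_iff_exists.mp ((PySem.List.index?_isSome_iff L c).mpr hc)
  obtain ⟨hlt, -, -⟩ := PySem.List.getElem_of_index?_eq_some hk
  rw [fiN, hk]
  exact hlt

lemma fList_append (L : List (List Int)) (c : List Int) :
    fList (L ++ [c]) = fList L ++ [((fiN (L ++ [c]) c : Nat) : Int)] := by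
  rw [fList, List.map_append, List.map_singleton, fList]
  congr 1
  apply List.map_congr_left
  intro x hx
  rw [fiN_prefix _ _ _ hx]

lemma length_fList (L : List (List Int)) : (fList L).length = L.length := by
  rw [fList, List.length_map]

lemma fList_take (L : List (List Int)) (f : Nat) :
    (fList L).take f = fList (L.take f) := by
  rw [fList, fList, ← List.map_take]
  apply List.map_congr_left
  intro c hc
  have h := fiN_prefix (L.take f) (L.drop f) c hc
  rw [List.take_append_drop] at h
  rw [h]

lemma core_count : ∀ (M : List (List Int)),
    (PySem.List.enumerate (fList M) 0).countP (fun p => decide (p.2 = p.1)) =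
      (PySem.Set.ofList M).length := by
  intro M
  induction M using List.reverseRecOn with
  | nil => rfl
  | append_singleton M c ih =>
    rw [fList_append, PySem.List.enumerate_append, List.countP_append, ih,
      PySem.Set.ofList_append_singleton]
    have hsing : PySem.List.enumerate [((fiN (M ++ [c]) c : Nat) : Int)] (0 + (fList M).length) =
        [((0 + (fList M).length : Int), ((fiN (M ++ [c]) c : Nat) : Int))] := rfl
    rw [hsing]
    by_cases hm : c ∈ M
    · rw [PySem.Set.add_of_mem ((PySem.Set.mem_ofList M c).mpr hm)]
      have hne : fiN (M ++ [c]) c ≠ (fList M).length := by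
        rw [fiN_prefix _ _ _ hm, length_fList]
        have := fiN_lt_length hm
        omega
      simp [hne]
    · rw [PySem.Set.add_of_not_mem (fun h => hm ((PySem.Set.mem_ofList M c).mp h))]
      have heq : fiN (M ++ [c]) c = (fList M).length := by
        rw [fiN, PySem.List.index?_append_singleton_self M c hm, length_fList]
        rfl
      simp [heq]

lemma idx_dedup {L : List (List Int)} {c : List Int} (hc : c ∈ L) :
    fiN (PySem.Set.ofList L) c = (PySem.Set.ofList (L.take (fiN L c))).length := by
  obtain ⟨k, hk⟩ := Option.isSome_iff_exists.mp ((PySem.List.index?_isSome_iff L c).mpr hc)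
  obtain ⟨pre, suf, hL, hlen, hpre⟩ := (PySem.List.index?_eq_some_iff L c k).mp hk
  have hfk : fiN L c = k := by rw [fiN, hk]; rfl
  have htake : L.take (fiN L c) = pre := by
    rw [hfk, ← hlen, hL, List.take_left]
  have hcpre : c ∉ PySem.Set.ofList pre := fun h => hpre ((PySem.Set.mem_ofList pre c).mp h)
  have hofL : PySem.Set.ofList L = (PySem.Set.ofList pre ++ [c]).update suf := by
    rw [hL, show pre ++ c :: suf = (pre ++ [c]) ++ suf by simp, PySem.Set.ofList_append,
      PySem.Set.ofList_append_singleton, PySem.Set.add_of_not_mem hcpre]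
  rw [hofL, htake, PySem.Set.update_eq_append_filter,
    fiN_prefix _ _ _ (by simp), fiN,
    PySem.List.index?_append_singleton_self _ c hcpre]
  rfl

lemma split_count (first : List Int) (f : Nat) (hf : f ≤ first.length) :
    (PySem.List.enumerate first 0).countP (fun p => decide (p.1 < (f : Int) ∧ p.2 = p.1)) =
      (PySem.List.enumerate (first.take f) 0).countP (fun p => decide (p.2 = p.1)) := by
  conv_lhs => rw [← List.take_append_drop f first]
  rw [PySem.List.enumerate_append, List.countP_append]
  have h2 : (PySem.List.enumerate (first.drop f) (0 + (first.take f).length)).countP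
      (fun p => decide (p.1 < (f : Int) ∧ p.2 = p.1)) = 0 := by
    apply List.countP_eq_zero.mpr
    intro p hp
    obtain ⟨k, hk, hpk⟩ := (PySem.List.mem_enumerate_iff _ _ p).mp hp
    subst hpk
    simp only [decide_eq_true_eq, List.length_take]
    rintro ⟨hlt, -⟩
    have : min f first.length = f := by omega
    omega
  rw [h2, Nat.add_zero]
  apply List.countP_congr
  intro p hp
  obtain ⟨k, hk, hpk⟩ := (PySem.List.mem_enumerate_iff _ _ p).mp hp
  subst hpk
  have hkf : k < f := by
    have := hk
    simp only [List.length_take] at this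
    omega
  simp only [decide_eq_true_eq]
  constructor
  · rintro ⟨-, h⟩; exact h
  · intro h; exact ⟨by omega, h⟩

lemma root_entry (L : List (List Int)) (c : List Int) (hc : c ∈ L) :
    ctB_count (fList L) ((fiN L c : Nat) : Int) =
      ((fiN (PySem.Set.ofList L) c : Nat) : Int) := by
  rw [ctB_count, PySem.List.foldl_ite_add_one, zero_add,
    split_count (fList L) (fiN L c) (by rw [length_fList]; exact le_of_lt (fiN_lt_length hc)),
    fList_take, core_count, idx_dedup hc]

lemma cd_flatMap : ∀ (L : List (List Int)),
    (PySem.List.enumerate ((fList L).zip L)).flatMap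
      (fun p => if p.2.1 = p.1 then p.2.2 else []) = (PySem.Set.ofList L).flatten := by
  intro L
  induction L using List.reverseRecOn with
  | nil => rfl
  | append_singleton M c ih =>
    rw [fList_append,
      List.zip_append (by rw [length_fList]),
      PySem.List.enumerate_append, List.flatMap_append, ih,
      PySem.Set.ofList_append_singleton]
    have hlen : ((fList M).zip M).length = M.length := by
      rw [List.length_zip, length_fList, Nat.min_self]
    have hsing : PySem.List.enumerate ([((fiN (M ++ [c]) c : Nat) : Int)].zip [c])
        (0 + (((fList M).zip M).length : Int)) =
        [((0 + (((fList M).zip M).length : Int)), (((fiN (M ++ [c]) c : Nat) : Int), c))] := rfl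
    rw [hsing]
    by_cases hm : c ∈ M
    · rw [PySem.Set.add_of_mem ((PySem.Set.mem_ofList M c).mpr hm)]
      have hne : fiN (M ++ [c]) c ≠ ((fList M).zip M).length := by
        rw [fiN_prefix _ _ _ hm, hlen]
        have := fiN_lt_length hm
        omega
      rw [List.flatMap_cons, List.flatMap_nil, List.append_nil]
      rw [if_neg (by push_cast; omega)]
      simp
    · rw [PySem.Set.add_of_not_mem (fun h => hm ((PySem.Set.mem_ofList M c).mp h))]
      have heq : fiN (M ++ [c]) c = ((fList M).zip M).length := by
        rw [fiN, PySem.List.index?_append_singleton_self M c hm, hlen]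
        rfl
      rw [List.flatMap_cons, List.flatMap_nil, List.append_nil]
      rw [if_pos (by push_cast; omega)]
      simp

lemma cd_eq (L : List (List Int)) :
    (PySem.List.enumerate ((fList L).zip L)).foldl
      (fun acc p => if p.2.1 = p.1 then acc ++ p.2.2 else acc) ([] : List Int) =
      (PySem.Set.ofList L).flatten := by
  rw [PySem.List.foldl_congr_mem _ _
      (fun acc p => acc ++ (if p.2.1 = p.1 then p.2.2 else [])) _
      (by intro acc p _; by_cases h : p.2.1 = p.1 <;> simp [h]),
    PySem.List.foldl_append_eq_flatMap, List.nil_append, cd_flatMap]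





-- ===== VERDICT (by name: the statement is the Claim_ definition above) =====
theorem compute_trie_spec : Claim_equal_compute_trie := by
  intro rawdata chunksize _ _
  unfold Spec_compute_trie compute_trie compute_trie_alt
  simp only []
  set L := (PySem.List.pyRange 0 (PySem.Int.floordiv (PySem.List.len rawdata) chunksize) 1).map
      (fun k => PySem.List.slice rawdata (some (k * chunksize)) (some ((k + 1) * chunksize))) with hL
  have hfold : (PySem.List.pyRange 0 (PySem.Int.floordiv (PySem.List.len rawdata) chunksize) 1).foldl
        (ctA_step rawdata chunksize) ([], PySem.Dict.empty, []) =
      L.foldl stepA ([], PySem.Dict.empty, []) := by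
    rw [hL, List.foldl_map]
    rfl
  rw [hfold]
  obtain ⟨h1, h2⟩ := loopA L [] [] PySem.Dict.empty []
      (by intro c; rw [PySem.Dict.get?_empty]; rfl) rfl
  rw [PySem.Set.update_nil_left] at h1 h2
  refine Prod.ext ?_ ?_
  · rw [h1]
    simp only [List.nil_append]
    have : (fList L).map (fun f => ctB_count (fList L) f) =
        L.map (fun c => ctB_count (fList L) ((fiN L c : Nat) : Int)) := by
      rw [fList, List.map_map]; rfl
    rw [show L.map (fun c => (((PySem.List.index? L c).getD 0 : Nat) : Int)) = fList L from rfl]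
    rw [this]
    exact List.map_congr_left (fun c hc => (root_entry L c hc).symm)
  · rw [h2]
    simp only [List.nil_append]
    rw [show L.map (fun c => (((PySem.List.index? L c).getD 0 : Nat) : Int)) = fList L from rfl]
    exact (cd_eq L).symm
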